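-- pv_equiv track=rewrite | github.com/james0032/TiePin | filter_training_igraph.py | create_entity_mappings
-- ===== SOURCE A (Python) =====
-- from typing import List, Set, Tuple, Dict, Optional
--
-- def create_entity_mappings(train_triples: List, test_triples: List) -> Tuple[Dict, Dict, Dict]:
--     """Create entity and relation mappings."""
--     entity_to_idx = {}
--     idx_to_entity = {}
--     relation_to_idx = {}
--
--     current_entity_idx = 0
--     current_relation_idx = 0
--
--     for triple in list(train_triples) + list(test_triples):
--         h, r, t = triple[0], triple[1], triple[2]
--
--         if h not in entity_to_idx:
--             entity_to_idx[h] = current_entity_idx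
--             idx_to_entity[current_entity_idx] = h
--             current_entity_idx += 1
--
--         if t not in entity_to_idx:
--             entity_to_idx[t] = current_entity_idx
--             idx_to_entity[current_entity_idx] = t
--             current_entity_idx += 1
--
--         if r not in relation_to_idx:
--             relation_to_idx[r] = current_relation_idx
--             current_relation_idx += 1
--
--     return entity_to_idx, idx_to_entity, relation_to_idx
-- ===== SOURCE B (Python) =====
-- def _first_occurrence_order(seq):
--     """Order the distinct elements of seq by first occurrence, via a reversed
--     overwrite pass (final pos[x] = first index of x) and a sort by that position."""
--     pos = {}
--     for i in range(len(seq) - 1, -1, -1):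
--         pos[seq[i]] = i
--     return sorted(pos, key=pos.get)
--
--
-- def create_entity_mappings(train_triples, test_triples):
--     """Create entity and relation mappings."""
--     triples = list(train_triples) + list(test_triples)
--     ent_seq = [x for tr in triples for x in (tr[0], tr[2])]
--     rel_seq = [tr[1] for tr in triples]
--     ents = _first_occurrence_order(ent_seq)
--     rels = _first_occurrence_order(rel_seq)
--     return ({e: i for i, e in enumerate(ents)},
--             {i: e for i, e in enumerate(ents)},
--             {r: i for i, r in enumerate(rels)})
-- ===== Notes on version B (the rewrite author's own statement) =====
-- stated objective: alternative
-- what changed: Replaces A's single forward pass that maintains three dicts and two counters with membership checks by a reversed-index overwrite pass recording each element's first-occurrence position and a sort of the keys by that position, then enumerate comprehensions build the three mappings.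
import Mathlib
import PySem

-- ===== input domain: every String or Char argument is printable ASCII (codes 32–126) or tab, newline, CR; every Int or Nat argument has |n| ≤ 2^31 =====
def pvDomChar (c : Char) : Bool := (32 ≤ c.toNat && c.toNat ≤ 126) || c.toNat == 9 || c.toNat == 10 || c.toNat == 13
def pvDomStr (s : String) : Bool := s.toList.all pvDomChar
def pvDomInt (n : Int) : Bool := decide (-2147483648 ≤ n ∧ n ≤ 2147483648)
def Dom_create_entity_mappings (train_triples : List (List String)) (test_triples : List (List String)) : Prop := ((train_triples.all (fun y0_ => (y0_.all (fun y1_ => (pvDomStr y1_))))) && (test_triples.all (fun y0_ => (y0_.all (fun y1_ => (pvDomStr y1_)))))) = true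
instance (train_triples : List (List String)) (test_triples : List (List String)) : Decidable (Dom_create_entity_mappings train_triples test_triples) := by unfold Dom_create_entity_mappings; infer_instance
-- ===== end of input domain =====

-- B replaces A's single forward pass (three dicts, two counters, membership checks) by a reversed-index
-- overwrite pass recording first-occurrence positions and a sort of the keys by that position (objective: alternative).

-- shared accessors: triple[0], triple[1], triple[2] (Pre_ rules out the IndexError case, so getD never yields the default)
def ceH (tr : List String) : String := (PySem.List.pyGet? tr 0).getD ""
def ceR (tr : List String) : String := (PySem.List.pyGet? tr 1).getD ""
def ceT (tr : List String) : String := (PySem.List.pyGet? tr 2).getD ""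

-- ===== PORT A =====
-- one iteration of A's for-loop; the five state components are the three dicts and the two counters
def ceStepA (st : List (String × Int) × List (Int × String) × List (String × Int) × Int × Int)
    (triple : List String) :
    List (String × Int) × List (Int × String) × List (String × Int) × Int × Int :=
  let h := ceH triple
  let r := ceR triple
  let t := ceT triple
  let e2i := st.1
  let i2e := st.2.1
  let r2i := st.2.2.1
  let ce := st.2.2.2.1
  let cr := st.2.2.2.2
  let s1 := if e2i.any (fun p => p.1 == h) then (e2i, i2e, ce)
            else (e2i ++ [(h, ce)], i2e ++ [(ce, h)], ce + 1)
  let s2 := if s1.1.any (fun p => p.1 == t) then s1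
            else (s1.1 ++ [(t, s1.2.2)], s1.2.1 ++ [(s1.2.2, t)], s1.2.2 + 1)
  let s3 := if r2i.any (fun p => p.1 == r) then (r2i, cr)
            else (r2i ++ [(r, cr)], cr + 1)
  (s2.1, s2.2.1, s3.1, s2.2.2, s3.2)

def create_entity_mappings (train_triples : List (List String)) (test_triples : List (List String)) : (List (String × Int)) × (List (Int × String)) × (List (String × Int)) :=
  let fin := (train_triples ++ test_triples).foldl ceStepA ([], [], [], 0, 0)
  (fin.1, fin.2.1, fin.2.2.1)

-- ===== PORT B =====
-- _first_occurrence_order's loop: for i in range(len(seq)-1, -1, -1): pos[seq[i]] = i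
-- (every i the range yields is a valid index, so pyGetD's default "" is never used)
def ceFirstPos (seq : List String) : PySem.Dict String Int :=
  (PySem.List.pyRange ((seq.length : Int) - 1) (-1) (-1)).foldl
    (fun d i => d.insert (PySem.List.pyGetD seq i "") i) PySem.Dict.empty

-- sorted(pos, key=pos.get): sorted iterates pos's keys; every element sorted sees is a key of pos,
-- so pos.get never returns None and getD's default 0 is never used
def ceOrder (seq : List String) : List String :=
  PySem.List.sorted (ceFirstPos seq).keys (fun e => (ceFirstPos seq).getD e 0) false

def create_entity_mappings_alt (train_triples : List (List String)) (test_triples : List (List String)) : (List (String × Int)) × (List (Int × String)) × (List (String × Int)) :=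
  let triples := train_triples ++ test_triples
  let entSeq := triples.flatMap (fun tr => [ceH tr, ceT tr])
  let relSeq := triples.map ceR
  let ents := ceOrder entSeq
  let rels := ceOrder relSeq
  ((PySem.List.enumerate ents).map (fun p => (p.2, p.1)),
   PySem.List.enumerate ents,
   (PySem.List.enumerate rels).map (fun p => (p.2, p.1)))

-- ===== PRECONDITION & SPEC =====
-- Pre_ excludes only inputs where Python A raises IndexError: some triple shorter than 3 elements.
def Pre_create_entity_mappings (train_triples : List (List String)) (test_triples : List (List String)) : Prop :=
  ∀ tr ∈ train_triples ++ test_triples, 3 ≤ tr.length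
instance (train_triples : List (List String)) (test_triples : List (List String)) : Decidable (Pre_create_entity_mappings train_triples test_triples) := by unfold Pre_create_entity_mappings; infer_instance

def pvWitness_create_entity_mappings : List (List String) × List (List String) :=
  ([["a", "r1", "b"], ["b", "r2", "c"]], [["a", "r1", "c"]])

def Spec_create_entity_mappings (train_triples : List (List String)) (test_triples : List (List String)) (out : (List (String × Int)) × (List (Int × String)) × (List (String × Int))) : Prop := out = create_entity_mappings_alt train_triples test_triples
instance (train_triples : List (List String)) (test_triples : List (List String)) (out : (List (String × Int)) × (List (Int × String)) × (List (String × Int))) : Decidable (Spec_create_entity_mappings train_triples test_triples out) := by unfold Spec_create_entity_mappings; infer_instance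

-- ===== CLAIM (what is proved, stated in full; the proofs are below) =====
def Claim_equal_create_entity_mappings : Prop := ∀ (train_triples : List (List String)) (test_triples : List (List String)), Dom_create_entity_mappings train_triples test_triples → Pre_create_entity_mappings train_triples test_triples → Spec_create_entity_mappings train_triples test_triples (create_entity_mappings train_triples test_triples)

-- ===== LEMMAS AND PROOFS =====

-- ---- A-side: A's loop state as a function of the ordered-unique entity/relation lists seen so far ----
def ceEncode (E R : List String) :
    List (String × Int) × List (Int × String) × List (String × Int) × Int × Int :=
  ((PySem.List.enumerate E).map (fun p => (p.2, p.1)),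
   PySem.List.enumerate E,
   (PySem.List.enumerate R).map (fun p => (p.2, p.1)),
   (E.length : Int), (R.length : Int))

lemma enum_any_snd (E : List String) (x : String) : ∀ s : Int,
    (PySem.List.enumerate E s).any (fun p => p.2 == x) = decide (x ∈ E) := by
  induction E with
  | nil => intro s; simp [PySem.List.enumerate_nil]
  | cons e es ih =>
      intro s
      simp only [PySem.List.enumerate_cons, List.any_cons, ih (s + 1), List.mem_cons]
      simp [Bool.beq_eq_decide_eq, eq_comm]

lemma ce_any_swap (E : List String) (x : String) :
    ((PySem.List.enumerate E).map (fun p => (p.2, p.1))).any (fun p => p.1 == x)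
      = decide (x ∈ E) := by
  rw [List.any_map]
  exact enum_any_snd E x 0

lemma ce_any_swap' (E : List String) (x : String) :
    ((PySem.List.enumerate E).map (fun p => (p.2, p.1))).any (fun p => decide (p.1 = x))
      = decide (x ∈ E) := by
  rw [← ce_any_swap E x]
  simp [Bool.beq_eq_decide_eq]

lemma exists_mem_enum (E : List String) (x : String) :
    (∃ a, (a, x) ∈ PySem.List.enumerate E) ↔ x ∈ E := by
  constructor
  · rintro ⟨a, hm⟩
    rw [PySem.List.mem_enumerate_iff] at hm
    obtain ⟨k, hk, heq⟩ := hm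
    cases heq
    exact List.getElem_mem hk
  · intro hx
    obtain ⟨k, hk, rfl⟩ := List.mem_iff_getElem.1 hx
    exact ⟨k, by rw [PySem.List.mem_enumerate_iff]; exact ⟨k, hk, by simp⟩⟩

lemma enum_add (L : List String) (x : String) :
    PySem.List.enumerate (PySem.Set.add L x) =
      if x ∈ L then PySem.List.enumerate L
      else PySem.List.enumerate L ++ [((L.length : Int), x)] := by
  by_cases hc : x ∈ L <;>
    simp [PySem.Set.add, PySem.Set.contains, hc, PySem.List.enumerate_append,
      PySem.List.enumerate_cons, PySem.List.enumerate_nil]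

lemma swap_enum_add (L : List String) (x : String) :
    (PySem.List.enumerate (PySem.Set.add L x)).map (fun p => (p.2, p.1)) =
      if x ∈ L then (PySem.List.enumerate L).map (fun p => (p.2, p.1))
      else (PySem.List.enumerate L).map (fun p => (p.2, p.1)) ++ [(x, (L.length : Int))] := by
  rw [enum_add]; split <;> simp

lemma len_add (L : List String) (x : String) :
    ((PySem.Set.add L x).length : Int) =
      if x ∈ L then (L.length : Int) else (L.length : Int) + 1 := by
  by_cases hc : x ∈ L <;> simp [PySem.Set.add, PySem.Set.contains, hc]

lemma ceStepA_encode (E R : List String) (tr : List String) :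
    ceStepA (ceEncode E R) tr =
      ceEncode (PySem.Set.add (PySem.Set.add E (ceH tr)) (ceT tr)) (PySem.Set.add R (ceR tr)) := by
  have hht : (ceH tr = ceT tr) ↔ (ceT tr = ceH tr) := eq_comm
  simp only [ceStepA, ceEncode]
  by_cases hh : ceH tr ∈ E
  · by_cases ht : ceT tr ∈ E
    · by_cases hr : ceR tr ∈ R <;>
        simp [hh, ht, hr, exists_mem_enum, Bool.beq_eq_decide_eq, ce_any_swap', enum_add, swap_enum_add, len_add, PySem.Set.mem_add,
          ce_any_swap, List.any_append, PySem.List.enumerate_append,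
          PySem.List.enumerate_cons, PySem.List.enumerate_nil]
    · by_cases hr : ceR tr ∈ R <;>
        simp [hh, ht, hr, exists_mem_enum, Bool.beq_eq_decide_eq, ce_any_swap', enum_add, swap_enum_add, len_add, PySem.Set.mem_add,
          ce_any_swap, List.any_append, PySem.List.enumerate_append,
          PySem.List.enumerate_cons, PySem.List.enumerate_nil]
  · by_cases ht : ceT tr ∈ E ∨ ceT tr = ceH tr
    · by_cases hr : ceR tr ∈ R <;>
        simp [hh, ht, hr, hht, exists_mem_enum, Bool.beq_eq_decide_eq, ce_any_swap', enum_add, swap_enum_add, len_add, PySem.Set.mem_add,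
          ce_any_swap, List.any_append, PySem.List.enumerate_append,
          PySem.List.enumerate_cons, PySem.List.enumerate_nil]
    · rw [not_or] at ht
      by_cases hr : ceR tr ∈ R <;>
        simp [hh, ht.1, ht.2, hr, hht, exists_mem_enum, Bool.beq_eq_decide_eq, ce_any_swap', enum_add, swap_enum_add, len_add, PySem.Set.mem_add,
          ce_any_swap, List.any_append, PySem.List.enumerate_append,
          PySem.List.enumerate_cons, PySem.List.enumerate_nil] <;> omega

lemma ceFold_encode (l : List (List String)) : ∀ (E R : List String),
    l.foldl ceStepA (ceEncode E R) =
      ceEncode (l.foldl (fun E tr => PySem.Set.add (PySem.Set.add E (ceH tr)) (ceT tr)) E)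
               (l.foldl (fun R tr => PySem.Set.add R (ceR tr)) R) := by
  induction l with
  | nil => intro E R; rfl
  | cons tr l ih =>
      intro E R
      simp only [List.foldl_cons, ceStepA_encode, ih]

lemma foldl_add_flat (l : List (List String)) : ∀ (E : List String),
    (l.flatMap (fun tr => [ceH tr, ceT tr])).foldl PySem.Set.add E =
      l.foldl (fun E tr => PySem.Set.add (PySem.Set.add E (ceH tr)) (ceT tr)) E := by
  induction l with
  | nil => intro E; rfl
  | cons tr l ih => intro E; simp [List.flatMap_cons, ih]

lemma dedup_flat_pair (l : List (List String)) :
    PySem.List.dedup (l.flatMap (fun tr => [ceH tr, ceT tr])) =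
      l.foldl (fun E tr => PySem.Set.add (PySem.Set.add E (ceH tr)) (ceT tr)) [] := by
  rw [PySem.List.dedup_eq_ofList, PySem.Set.ofList_eq_foldl, foldl_add_flat]

lemma dedup_map_rel (l : List (List String)) :
    PySem.List.dedup (l.map ceR) = l.foldl (fun R tr => PySem.Set.add R (ceR tr)) [] := by
  rw [PySem.List.dedup_eq_ofList, PySem.Set.ofList_eq_foldl, List.foldl_map]

-- ---- B-side: the reversed overwrite pass + sort recovers the first-occurrence order ----

-- the dict built by B's reversed loop, as a right fold over the enumerated sequence
def ceBuild (ps : List (Int × String)) : PySem.Dict String Int :=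
  ps.foldr (fun p d => d.insert p.2 p.1) PySem.Dict.empty

lemma ceBuild_cons (x : String) (xs : List String) (s : Int) :
    ceBuild (PySem.List.enumerate (x :: xs) s) = (ceBuild (PySem.List.enumerate xs (s+1))).insert x s := by
  rw [PySem.List.enumerate_cons]; rfl

lemma ceBuild_contains (seq : List String) : ∀ (s : Int) (e : String),
    (ceBuild (PySem.List.enumerate seq s)).contains e = decide (e ∈ seq) := by
  induction seq with
  | nil => intro s e; simp [ceBuild, PySem.List.enumerate_nil, PySem.Dict.contains_empty]
  | cons x xs ih =>
      intro s e
      rw [ceBuild_cons, PySem.Dict.contains_insert, ih (s+1) e]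
      simp [Bool.beq_eq_decide_eq]

lemma ceBuild_nodup_keys (seq : List String) : ∀ (s : Int),
    (ceBuild (PySem.List.enumerate seq s)).keys.Nodup := by
  induction seq with
  | nil => intro s; simp [ceBuild, PySem.List.enumerate_nil, PySem.Dict.keys_empty]
  | cons x xs ih =>
      intro s
      rw [ceBuild_cons]
      by_cases hc : x ∈ xs
      · rw [PySem.Dict.keys_insert_of_contains]
        · exact ih (s+1)
        · rw [ceBuild_contains]; simpa
      · have hk : x ∉ (ceBuild (PySem.List.enumerate xs (s+1))).keys := by
          intro hmem
          have := (PySem.Dict.contains_iff_mem_keys _ _).2 hmem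
          rw [ceBuild_contains] at this
          simp at this; exact hc this
        rw [PySem.Dict.keys_insert_of_not_contains]
        · simp [List.nodup_append, ih (s+1)]
          exact fun a ha h => hk (h ▸ ha)
        · rw [ceBuild_contains]; simpa

lemma ceBuild_get? (seq : List String) : ∀ (s : Int) (e : String), e ∈ seq →
    (ceBuild (PySem.List.enumerate seq s)).get? e = some (s + (seq.idxOf e : Int)) := by
  induction seq with
  | nil => intro s e h; simp at h
  | cons x xs ih =>
      intro s e he
      rw [ceBuild_cons]
      by_cases hex : e = x
      · subst hex
        rw [PySem.Dict.get?_insert_self, List.idxOf_cons_eq _ rfl]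
        simp
      · rw [PySem.Dict.get?_insert_of_ne (hne := hex), ih (s+1) e (by
          rcases List.mem_cons.1 he with h|h
          · exact absurd h hex
          · exact h), List.idxOf_cons_ne _ (Ne.symm hex)]
        congr 1
        push_cast
        ring


lemma dedup_pairwise_idxOf (seq : List String) :
    (PySem.List.dedup seq).Pairwise (fun a b => seq.idxOf a < seq.idxOf b) := by
  induction seq using List.reverseRecOn with
  | nil => simp [PySem.List.dedup_eq_ofList, PySem.Set.ofList]
  | append_singleton xs x ih =>
      have hded : PySem.List.dedup (xs ++ [x]) =
          if x ∈ xs then PySem.List.dedup xs else PySem.List.dedup xs ++ [x] := by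
        rw [PySem.List.dedup_eq_ofList, PySem.List.dedup_eq_ofList, PySem.Set.ofList_eq_foldl,
          PySem.Set.ofList_eq_foldl, List.foldl_append]
        simp only [List.foldl_cons, List.foldl_nil]
        rw [PySem.Set.add]
        by_cases hc : x ∈ xs <;>
          simp [hc, PySem.Set.mem_ofList, ← PySem.Set.ofList_eq_foldl]
      have htrans : (PySem.List.dedup xs).Pairwise (fun a b => (xs ++ [x]).idxOf a < (xs ++ [x]).idxOf b) := by
        refine ih.imp_of_mem ?_
        intro a b ha hb hlt
        rw [List.idxOf_append_of_mem ((PySem.List.mem_dedup _ _).1 ha),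
          List.idxOf_append_of_mem ((PySem.List.mem_dedup _ _).1 hb)]
        exact hlt
      rw [hded]
      by_cases hc : x ∈ xs
      · simpa [hc] using htrans
      · simp only [hc, if_false]
        rw [List.pairwise_append]
        refine ⟨htrans, by simp, ?_⟩
        intro a ha b hb
        rw [List.mem_singleton] at hb
        subst hb
        rw [List.idxOf_append_of_mem ((PySem.List.mem_dedup _ _).1 ha),
          List.idxOf_append_of_notMem hc]
        have h1 := List.idxOf_lt_length_of_mem ((PySem.List.mem_dedup _ _).1 ha)
        simp only [List.idxOf_cons_eq _ rfl]
        omega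

lemma ceFirstPos_eq_build (seq : List String) :
    ceFirstPos seq = ceBuild (PySem.List.enumerate seq) := by
  unfold ceFirstPos ceBuild
  rw [PySem.List.pyRange_neg_one_eq_reverse]
  norm_num
  rw [PySem.List.enumerate_eq_map_pyRange (d := "")]
  rw [List.foldr_map]
  norm_num [PySem.List.len]

lemma ceOrder_eq_dedup (seq : List String) : ceOrder seq = PySem.List.dedup seq := by
  have hperm : (PySem.List.dedup seq).Perm (ceBuild (PySem.List.enumerate seq)).keys := by
    rw [List.perm_ext_iff_of_nodup (PySem.List.nodup_dedup _) (ceBuild_nodup_keys seq 0)]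
    intro a
    rw [PySem.List.mem_dedup]
    constructor
    · intro h
      exact (PySem.Dict.contains_iff_mem_keys _ _).1 (by rw [ceBuild_contains]; simpa)
    · intro h
      have := (PySem.Dict.contains_iff_mem_keys _ _).2 h
      rw [ceBuild_contains] at this
      simpa using this
  have hpw : (PySem.List.dedup seq).Pairwise
      (fun a b => (ceBuild (PySem.List.enumerate seq)).getD a 0 < (ceBuild (PySem.List.enumerate seq)).getD b 0) := by
    refine (dedup_pairwise_idxOf seq).imp_of_mem ?_
    intro a b ha hb hlt
    have g1 : (ceBuild (PySem.List.enumerate seq)).getD a 0 = (seq.idxOf a : Int) := by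
      show ((ceBuild (PySem.List.enumerate seq)).get? a).getD 0 = _
      rw [ceBuild_get? seq 0 a ((PySem.List.mem_dedup _ _).1 ha)]
      simp
    have g2 : (ceBuild (PySem.List.enumerate seq)).getD b 0 = (seq.idxOf b : Int) := by
      show ((ceBuild (PySem.List.enumerate seq)).get? b).getD 0 = _
      rw [ceBuild_get? seq 0 b ((PySem.List.mem_dedup _ _).1 hb)]
      simp
    rw [g1, g2]
    exact_mod_cast hlt
  unfold ceOrder
  rw [ceFirstPos_eq_build]
  apply PySem.List.sorted_eq_of_perm_of_pairwise_lt <;> [exact hperm; exact hpw]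

-- ===== VERDICT (by name: the statement is the Claim_ definition above) =====
theorem create_entity_mappings_spec : Claim_equal_create_entity_mappings := by
  intro train test _ _
  unfold Spec_create_entity_mappings create_entity_mappings create_entity_mappings_alt
  have h0 : (([] : List (String × Int)), ([] : List (Int × String)),
      ([] : List (String × Int)), (0 : Int), (0 : Int)) = ceEncode [] [] := rfl
  rw [h0, ceFold_encode]
  dsimp only
  rw [ceOrder_eq_dedup, ceOrder_eq_dedup, dedup_flat_pair, dedup_map_rel]
  rfl
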